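-- pv_equiv track=rewrite | github.com/ldw3097/Algorithm_study | 24.11.26/이차원_배열과_연산.py | arrcalc
-- ===== SOURCE A (Python) =====
-- def linecalc(idx, arr, isrcalc):
--     lim = len(arr[0]) if isrcalc else len(arr)
--     items = {}
--     for i in range(lim):
--         item = arr[idx][i] if isrcalc else arr[i][idx]
--         if item == 0:
--             continue
--         items.setdefault(item, 0)
--         items[item] += 1
--     items = items.items()
--     items = sorted(items, key = lambda x: (x[1], x[0]))
--     newlist = []
--     for item in items:
--         newlist.extend(item)
--     if len(newlist) > 100:
--         newlist = newlist[:100]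
--     return newlist
--
-- def arrcalc(arr):
--     isrcalc = (len(arr) >= len(arr[0]))
--     newlists = []
--     idxlim = len(arr) if isrcalc else len(arr[0])
--     for idx in range(idxlim):
--         calcret = linecalc(idx, arr, isrcalc)
--         if calcret == []:
--             break
--         newlists.append(calcret)
--     maximum = 0
--     for newlist in newlists:
--         maximum = max(maximum, len(newlist))
--     colcnt = maximum if isrcalc else len(newlists)
--     rowcnt = len(newlists) if isrcalc else maximum
--     newarr = [[0]*colcnt for _ in range(rowcnt)]
--     for i, newlist in enumerate(newlists):
--         for j, newitem in enumerate(newlist):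
--             rowpos = i if isrcalc else j
--             colpos = j if isrcalc else i
--             newarr[rowpos][colpos] = newitem
--     return newarr
-- ===== SOURCE B (Python) =====
-- def arrcalc(arr):
--     isrcalc = len(arr) >= len(arr[0])
--     work = ([row[:len(arr[0])] for row in arr] if isrcalc
--             else [[arr[i][j] for i in range(len(arr))] for j in range(len(arr[0]))])
--     lines = []
--     for row in work:
--         vals = [v for v in row if v != 0]
--         runs = [(v, vals.count(v)) for v in sorted(set(vals))]
--         flat = []
--         # counting-sort sweep: emit runs grouped by multiplicity, smallest count first,
--         # values ascending inside each group (runs is value-ascending)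
--         for c in range(1, len(row) + 1):
--             for v, cnt in runs:
--                 if cnt == c:
--                     flat += [v, c]
--         flat = flat[:100]
--         if not flat:
--             break
--         lines.append(flat)
--     width = max((len(l) for l in lines), default=0)
--     padded = [l + [0] * (width - len(l)) for l in lines]
--     return padded if isrcalc else [[padded[i][j] for i in range(len(lines))] for j in range(width)]
-- ===== Notes on version B (the rewrite author's own statement) =====
-- stated objective: alternative
-- what changed: B drops A's per-line hash-counter and comparison sort by (count,value): it lists the distinct nonzero values in ascending order (sorted set), attaches each value's .count, and arranges the pairs by a counting-sort sweep over the possible multiplicities c = 1..len(line) (no comparison sort of pairs at all); the matrix is handled as a uniform row pipeline with a transpose in/out instead of A's dual-indexed scan and preallocated mutated zero matrix.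
-- outside the precondition, e.g. on arrcalc([[0, 0], [1]]): A returns [], B returns []; on arrcalc([[0, 1, 2], [0]]): A returns [], B raises IndexError; on arrcalc([]): A raises IndexError, B raises IndexError
import Mathlib
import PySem

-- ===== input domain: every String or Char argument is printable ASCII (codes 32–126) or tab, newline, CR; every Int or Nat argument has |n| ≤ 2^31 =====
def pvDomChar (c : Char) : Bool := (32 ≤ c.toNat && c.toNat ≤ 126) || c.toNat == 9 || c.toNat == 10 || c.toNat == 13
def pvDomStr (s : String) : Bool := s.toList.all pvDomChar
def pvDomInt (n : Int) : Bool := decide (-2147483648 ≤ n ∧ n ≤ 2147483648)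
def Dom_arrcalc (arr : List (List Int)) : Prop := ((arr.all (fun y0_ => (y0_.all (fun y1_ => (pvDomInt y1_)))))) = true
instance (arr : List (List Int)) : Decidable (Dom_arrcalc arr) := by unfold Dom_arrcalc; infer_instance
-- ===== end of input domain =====

-- B replaces A's per-line hash-counter + comparison sort by (count,value) with: distinct nonzero
-- values in ascending order (sorted set) paired with their .count, arranged by a counting-sort
-- sweep over the multiplicities 1..len(line); the matrix is one uniform row pipeline with a
-- transpose in/out instead of A's dual-indexed scan over a preallocated mutated zero matrix.

-- ===== PORT A =====
def linecalc (idx : Int) (arr : List (List Int)) (isrcalc : Bool) : List Int :=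
  let lim : Int := if isrcalc then ((PySem.List.pyGetD arr 0 []).length : Int) else (arr.length : Int)
  let items : PySem.Dict Int Int :=
    (PySem.List.pyRange 0 lim 1).foldl (fun d i =>
      let item := if isrcalc then PySem.List.pyGetD (PySem.List.pyGetD arr idx []) i 0
                  else PySem.List.pyGetD (PySem.List.pyGetD arr i []) idx 0
      if item = 0 then d
      else (d.setdefault item 0).modify item 0 (· + 1)) PySem.Dict.empty
  let itemsSorted := PySem.List.sorted2 items.items (·.2) (·.1)
  let newlist := itemsSorted.foldl (fun acc p => acc ++ [p.1, p.2]) []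
  if newlist.length > 100 then PySem.List.slice newlist none (some 100) else newlist

def arrcalcLoop (arr : List (List Int)) (isrcalc : Bool) : List Int → List (List Int) → List (List Int)
  | [], acc => acc
  | idx :: rest, acc =>
    let calcret := linecalc idx arr isrcalc
    if calcret = [] then acc else arrcalcLoop arr isrcalc rest (acc ++ [calcret])

def arrcalc (arr : List (List Int)) : List (List Int) :=
  let isrcalc : Bool := decide ((arr.length : Int) ≥ ((PySem.List.pyGetD arr 0 []).length : Int))
  let idxlim : Int := if isrcalc then (arr.length : Int) else ((PySem.List.pyGetD arr 0 []).length : Int)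
  let newlists := arrcalcLoop arr isrcalc (PySem.List.pyRange 0 idxlim 1) []
  let maximum : Int := newlists.foldl (fun m l => max m (l.length : Int)) 0
  let colcnt : Int := if isrcalc then maximum else (newlists.length : Int)
  let rowcnt : Int := if isrcalc then (newlists.length : Int) else maximum
  let newarr : List (List Int) := List.replicate rowcnt.toNat (List.replicate colcnt.toNat 0)
  (PySem.List.enumerate newlists 0).foldl (fun na p =>
    (PySem.List.enumerate p.2 0).foldl (fun na q =>
      let rowpos : Int := if isrcalc then p.1 else q.1
      let colpos : Int := if isrcalc then q.1 else p.1
      PySem.List.pySetD na rowpos (PySem.List.pySetD (PySem.List.pyGetD na rowpos []) colpos q.2)) na) newarr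

-- ===== PORT B =====
-- one row of Source B's loop body: distinct nonzero values ascending, each with its count,
-- emitted by the counting-sort sweep c = 1 .. len(row)
def flatOf (row : List Int) : List Int :=
  let vals := row.filter (fun v => v ≠ 0)
  let runs := (PySem.List.sorted (PySem.Set.ofList vals) (fun x => x)).map
      (fun v => (v, (PySem.List.count vals v : Int)))
  let flat := (PySem.List.pyRange 1 ((row.length : Int) + 1) 1).foldl
      (fun acc c => runs.foldl
        (fun acc p => if p.2 = c then acc ++ [p.1, c] else acc) acc) []
  PySem.List.slice flat none (some 100)

def linesRec : List (List Int) → List (List Int)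
  | [] => []
  | row :: rest =>
    let flat := flatOf row
    if flat = [] then [] else flat :: linesRec rest

def arrcalc_alt (arr : List (List Int)) : List (List Int) :=
  let w : Nat := (PySem.List.pyGetD arr 0 []).length
  let isrcalc : Bool := decide ((arr.length : Int) ≥ (w : Int))
  let work : List (List Int) :=
    if isrcalc then arr.map (fun row => PySem.List.slice row none (some (w : Int)))
    else (List.range w).map (fun (j : Nat) => (List.range arr.length).map (fun (i : Nat) =>
      PySem.List.pyGetD (PySem.List.pyGetD arr ((i : Nat) : Int) []) ((j : Nat) : Int) 0))
  let lines := linesRec work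
  let width : Nat := (lines.map (fun l => l.length)).foldl max 0
  let padded := lines.map (fun l => l ++ List.replicate (width - l.length) 0)
  if isrcalc then padded
  else (List.range width).map (fun (j : Nat) => (List.range lines.length).map (fun (i : Nat) =>
    PySem.List.pyGetD (PySem.List.pyGetD padded ((i : Nat) : Int) []) ((j : Nat) : Int) 0))

-- ===== PRECONDITION & SPEC =====
-- Pre_ excludes the empty array (A raises IndexError on arr[0]) and ragged inputs whose later
-- rows are shorter than the first row, on which A raises IndexError except when an earlier all-zero
-- line breaks the loop first (then A returns [], as B's own break also does or B raises).
def Pre_arrcalc (arr : List (List Int)) : Prop :=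
  arr ≠ [] ∧ ∀ row ∈ arr, (arr.headI).length ≤ row.length
instance (arr : List (List Int)) : Decidable (Pre_arrcalc arr) := by unfold Pre_arrcalc; infer_instance

def pvWitness_arrcalc : List (List Int) := [[1, 2, 2], [0, 3, 3]]

def Spec_arrcalc (arr : List (List Int)) (out : List (List Int)) : Prop := out = arrcalc_alt arr
instance (arr : List (List Int)) (out : List (List Int)) : Decidable (Spec_arrcalc arr out) := by unfold Spec_arrcalc; infer_instance

-- ===== CLAIM (what is proved, stated in full; the proofs are below) =====
def Claim_equal_arrcalc : Prop := ∀ (arr : List (List Int)), Dom_arrcalc arr → Pre_arrcalc arr → Spec_arrcalc arr (arrcalc arr)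

-- ===== LEMMAS AND PROOFS =====

-- A's per-line computation, pulled out over the materialised line
def aCore (l : List Int) : List Int :=
  let items : PySem.Dict Int Int :=
    l.foldl (fun d item => if item = 0 then d
      else (d.setdefault item 0).modify item 0 (· + 1)) PySem.Dict.empty
  let itemsSorted := PySem.List.sorted2 items.items (·.2) (·.1)
  let newlist := itemsSorted.foldl (fun acc p => acc ++ [p.1, p.2]) []
  if newlist.length > 100 then PySem.List.slice newlist none (some 100) else newlist

def padTo (M : Nat) (l : List Int) : List Int := l ++ List.replicate (M - l.length) 0

-- strict lexicographic order on (value, count) pairs under A's sort key (count, value)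
def rLex (a b : Int × Int) : Prop := a.2 < b.2 ∨ (a.2 = b.2 ∧ a.1 < b.1)

def ltB (a b : Int × Int) : Bool :=
  decide (a.2 < b.2) || (!decide (b.2 < a.2) && decide (a.1 < b.1))

theorem ltB_iff (a b : Int × Int) : ltB a b = true ↔ rLex a b := by
  simp only [ltB, rLex, Bool.or_eq_true, Bool.and_eq_true, Bool.not_eq_eq_eq_not,
    Bool.not_true, decide_eq_true_eq, decide_eq_false_iff_not]
  omega

theorem sorted2_eq_foldl (xs : List (Int × Int)) :
    PySem.List.sorted2 xs (·.2) (·.1)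
      = xs.foldl (fun acc x => PySem.List.insertBy ltB x acc) [] := rfl

theorem insertBy_pairwise (x : Int × Int) :
    ∀ acc : List (Int × Int), acc.Pairwise (fun a b => ¬ rLex b a) →
    (PySem.List.insertBy ltB x acc).Pairwise (fun a b => ¬ rLex b a) := by
  intro acc
  induction acc with
  | nil => intro _; simp [PySem.List.insertBy]
  | cons y ys ih =>
    intro h
    obtain ⟨hy, hys⟩ := List.pairwise_cons.mp h
    show (if ltB x y then x :: y :: ys else y :: PySem.List.insertBy ltB x ys).Pairwise _
    split_ifs with hb
    · have hxy : rLex x y := (ltB_iff x y).mp hb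
      refine List.pairwise_cons.mpr ⟨?_, h⟩
      intro z hz
      rcases List.mem_cons.mp hz with rfl | hz'
      · rcases hxy with h1 | ⟨h1, h2⟩ <;> (unfold rLex; omega)
      · have hzy := hy z hz'
        unfold rLex at hzy ⊢
        rcases hxy with h1 | ⟨h1, h2⟩ <;> omega
    · have hxy : ¬ rLex x y := fun hr => hb ((ltB_iff x y).mpr hr)
      refine List.pairwise_cons.mpr ⟨?_, ih hys⟩
      intro z hz
      rcases (PySem.List.mem_insertBy ltB x z ys).mp hz with rfl | hz'
      · exact hxy
      · exact hy z hz'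

theorem sorted2_pw (xs : List (Int × Int)) :
    (PySem.List.sorted2 xs (·.2) (·.1)).Pairwise (fun a b => ¬ rLex b a) := by
  rw [sorted2_eq_foldl]
  have aux : ∀ (l : List (Int × Int)) (acc : List (Int × Int)),
      acc.Pairwise (fun a b => ¬ rLex b a) →
      (l.foldl (fun acc x => PySem.List.insertBy ltB x acc) acc).Pairwise (fun a b => ¬ rLex b a) := by
    intro l
    induction l with
    | nil => intro acc h; simpa using h
    | cons x t ihl =>
      intro acc h
      exact ihl _ (insertBy_pairwise x acc h)
  exact aux xs [] (by simp)

theorem perm_pairwise_eq :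
    ∀ (l2 l1 : List (Int × Int)), l1.Perm l2 →
    l1.Pairwise (fun a b => ¬ rLex b a) → l2.Pairwise rLex → l1 = l2 := by
  intro l2
  induction l2 with
  | nil => intro l1 hp _ _; exact hp.eq_nil
  | cons b t ih =>
    intro l1 hp h1 h2
    obtain ⟨hb2, ht2⟩ := List.pairwise_cons.mp h2
    cases l1 with
    | nil => exact absurd hp.symm.eq_nil (by simp)
    | cons c u =>
      obtain ⟨hc1, hu1⟩ := List.pairwise_cons.mp h1
      by_cases hcb : c = b
      · subst hcb
        have := ih u (hp.cons_inv) hu1 ht2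
        rw [this]
      · exfalso
        have hcmem : c ∈ t := by
          have := hp.subset (List.mem_cons_self ..)
          rcases List.mem_cons.mp this with h | h
          · exact absurd h hcb
          · exact h
        have hbc : rLex b c := hb2 c hcmem
        have hbmem : b ∈ u := by
          have := hp.symm.subset (List.mem_cons_self ..)
          rcases List.mem_cons.mp this with h | h
          · exact absurd h.symm hcb
          · exact h
        exact hc1 b hbmem hbc

theorem sorted2_char (xs ys : List (Int × Int)) (hperm : ys.Perm xs)
    (hpw : ys.Pairwise rLex) : PySem.List.sorted2 xs (·.2) (·.1) = ys :=
  perm_pairwise_eq ys _ ((PySem.List.sorted2_perm xs (·.2) (·.1) false).trans hperm.symm)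
    (sorted2_pw xs) hpw

-- dict steps agree
theorem dictStep_eq (d : PySem.Dict Int Int) (v : Int) :
    (d.setdefault v 0).modify v 0 (· + 1) = d.insert v (d.getD v 0 + 1) := by
  by_cases h : d.contains v = true
  · rw [PySem.Dict.setdefault_of_contains d 0 h]; rfl
  · rw [PySem.Dict.setdefault_of_not_contains d 0 (by simpa using h)]
    simp [PySem.Dict.modify, PySem.Dict.getD_insert_self, PySem.Dict.insert_insert_self,
      PySem.Dict.getD_of_not_contains d 0 (by simpa using h)]

theorem countFold_eq (l : List Int) (d0 : PySem.Dict Int Int) :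
    l.foldl (fun d item => if item = 0 then d else (d.setdefault item 0).modify item 0 (· + 1)) d0
      = l.foldl (fun d v => if v ≠ 0 then d.insert v (d.getD v 0 + 1) else d) d0 := by
  apply PySem.List.foldl_congr_mem
  intro acc x _
  by_cases hx : x = 0 <;> simp [hx, dictStep_eq]

-- A's dict is the Counter of the nonzero values
theorem dict_eq_counter (l : List Int) :
    l.foldl (fun d item => if item = 0 then d else (d.setdefault item 0).modify item 0 (· + 1))
        PySem.Dict.empty
      = PySem.Dict.counter (l.filter (fun v => v ≠ 0)) := by
  rw [countFold_eq, ← PySem.Dict.foldl_insert_getD_add_one_eq_counter, List.foldl_filter]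
  apply PySem.List.foldl_congr_mem
  intro acc x _
  by_cases hx : x = 0 <;> simp [hx]

-- truncation
theorem trunc_eq (l : List Int) :
    (if l.length > 100 then PySem.List.slice l none (some 100) else l)
      = PySem.List.slice l none (some 100) := by
  split_ifs with h
  · rfl
  · rw [show ((100 : Int) = ((100 : Nat) : Int)) by norm_num, PySem.List.slice_to_natCast]
    exact (List.take_of_length_le (by omega)).symm

-- the per-c emission loop as a filter/flatMap
theorem flatMap_ite_filter (c : Int) :
    ∀ rs : List (Int × Int),
    rs.flatMap (fun p => if p.2 = c then [p.1, c] else [])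
      = (rs.filter (fun p => decide (p.2 = c))).flatMap (fun p => [p.1, p.2]) := by
  intro rs
  induction rs with
  | nil => rfl
  | cons x t ih =>
    rw [List.flatMap_cons, List.filter_cons]
    by_cases hx : x.2 = c
    · simp only [hx, decide_true, if_pos trivial, List.flatMap_cons, ih]
    · simp only [decide_eq_true_eq, hx, not_false_iff, if_neg, List.nil_append, ih]

-- distributing one element over the buckets it belongs to
theorem flatMap_if_perm (x : Int × Int) (f : Int → List (Int × Int)) :
    ∀ cs : List Int, cs.Nodup → x.2 ∈ cs →
    (cs.flatMap (fun c => if x.2 = c then x :: f c else f c)).Perm (x :: cs.flatMap f) := by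
  intro cs
  induction cs with
  | nil => intro _ h; exact absurd h (by simp)
  | cons c cs' ih =>
    intro hnd hmem
    obtain ⟨hnc, hnd'⟩ := List.nodup_cons.mp hnd
    rw [List.flatMap_cons, List.flatMap_cons]
    by_cases h : x.2 = c
    · rw [if_pos h]
      have hrest : cs'.flatMap (fun c' => if x.2 = c' then x :: f c' else f c') = cs'.flatMap f := by
        rw [List.flatMap_def, List.flatMap_def]
        congr 1
        apply List.map_congr_left
        intro a ha
        have hca : c ≠ a := fun hc => hnc (hc ▸ ha)
        rw [if_neg (fun hxa => hca (h ▸ hxa))]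
      rw [hrest, List.cons_append]
    · rw [if_neg h]
      have hmem' : x.2 ∈ cs' := by
        rcases List.mem_cons.mp hmem with h' | h'
        · exact absurd h' h
        · exact h'
      exact (List.Perm.append_left (f c) (ih hnd' hmem')).trans List.perm_middle

-- the counting-sort sweep is a permutation of the runs
theorem partition_perm :
    ∀ (rs : List (Int × Int)) (cs : List Int), cs.Nodup → (∀ p ∈ rs, p.2 ∈ cs) →
    (cs.flatMap (fun c => rs.filter (fun p => decide (p.2 = c)))).Perm rs := by
  intro rs
  induction rs with
  | nil =>
    intro cs _ _
    simp
  | cons x t ih =>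
    intro cs hnd hmem
    have hstep : (cs.flatMap (fun c => (x :: t).filter (fun p => decide (p.2 = c))))
        = cs.flatMap (fun c => if x.2 = c then x :: t.filter (fun p => decide (p.2 = c))
            else t.filter (fun p => decide (p.2 = c))) := by
      rw [List.flatMap_def, List.flatMap_def]
      congr 1
      apply List.map_congr_left
      intro c _
      rw [List.filter_cons]
      by_cases h : x.2 = c
      · rw [if_pos h, if_pos (by simpa using h)]
      · rw [if_neg h, if_neg (by simpa using h)]
    rw [hstep]
    have h1 := flatMap_if_perm x (fun c => t.filter (fun p => decide (p.2 = c))) cs hnd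
      (hmem x (List.mem_cons_self ..))
    exact h1.trans ((ih cs hnd (fun p hp => hmem p (List.mem_cons_of_mem _ hp))).cons x)

-- the counting-sort sweep is lexicographically sorted
theorem partition_pairwise (rs : List (Int × Int))
    (hrs : rs.Pairwise (fun a b => a.1 < b.1)) (cs : List Int)
    (hcs : cs.Pairwise (· < ·)) :
    (cs.flatMap (fun c => rs.filter (fun p => decide (p.2 = c)))).Pairwise rLex := by
  rw [List.flatMap_def, List.pairwise_flatten]
  constructor
  · intro l hl
    obtain ⟨c, _, rfl⟩ := List.mem_map.mp hl
    have hf : (rs.filter (fun p => decide (p.2 = c))).Pairwise (fun a b => a.1 < b.1) :=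
      hrs.filter _
    refine hf.imp_of_mem ?_
    intro a b ha hb hab
    have ha2 : a.2 = c := by simpa using (List.mem_filter.mp ha).2
    have hb2 : b.2 = c := by simpa using (List.mem_filter.mp hb).2
    exact Or.inr ⟨ha2.trans hb2.symm, hab⟩
  · rw [List.pairwise_map]
    refine hcs.imp ?_
    intro c1 c2 hlt x hx y hy
    have hx2 : x.2 = c1 := by simpa using (List.mem_filter.mp hx).2
    have hy2 : y.2 = c2 := by simpa using (List.mem_filter.mp hy).2
    exact Or.inl (by omega)

-- A's per-line core equals B's per-line pipeline
theorem aCore_flatOf (l : List Int) : aCore l = flatOf l := by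
  unfold aCore flatOf
  simp only []
  rw [dict_eq_counter, trunc_eq]
  set vals := l.filter (fun v => v ≠ 0) with hvals
  set runs := (PySem.List.sorted (PySem.Set.ofList vals) (fun x => x)).map
      (fun v => (v, (PySem.List.count vals v : Int))) with hruns
  set cs := PySem.List.pyRange 1 ((l.length : Int)+1) 1 with hcs
  -- B's double fold is the flatMap over buckets
  have hB : (cs.foldl (fun acc c => runs.foldl
        (fun acc p => if p.2 = c then acc ++ [p.1, c] else acc) acc) [])
      = cs.flatMap (fun c => (runs.filter (fun p => decide (p.2 = c))).flatMap
          (fun p => [p.1, p.2])) := by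
    have hfun : (fun (acc : List Int) (c : Int) => runs.foldl
          (fun acc p => if p.2 = c then acc ++ [p.1, c] else acc) acc)
        = (fun acc c => acc ++ (runs.filter (fun p => decide (p.2 = c))).flatMap
            (fun p => [p.1, p.2])) := by
      funext acc c
      have hfun2 : (fun (acc : List Int) (p : Int × Int) =>
            if p.2 = c then acc ++ [p.1, c] else acc)
          = (fun acc p => acc ++ (if p.2 = c then [p.1, c] else [])) := by
        funext acc p
        split_ifs <;> simp
      rw [hfun2, PySem.List.foldl_append_eq_flatMap, flatMap_ite_filter]
    rw [hfun, PySem.List.foldl_append_eq_flatMap, List.nil_append]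
  rw [hB]
  -- A's flatten
  rw [PySem.List.foldl_append_eq_flatMap, List.nil_append]
  -- A's sorted items equal the bucket arrangement
  have hitems := PySem.Dict.items_counter vals
  have hrunsC : runs = (PySem.List.sorted (PySem.Set.ofList vals) (fun x => x)).map
      (fun k => (k, ((List.count k vals : Nat) : Int))) := rfl
  have hperm : (cs.flatMap (fun c => runs.filter (fun p => decide (p.2 = c)))).Perm
      ((PySem.Dict.counter vals).items) := by
    have h1 : (cs.flatMap (fun c => runs.filter (fun p => decide (p.2 = c)))).Perm runs := by
      apply partition_perm
      · rw [hcs]; exact PySem.List.nodup_pyRange_one 1 _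
      · intro p hp
        rw [hrunsC] at hp
        obtain ⟨v, hv, rfl⟩ := List.mem_map.mp hp
        have hvmem : v ∈ vals := by
          have := (PySem.List.mem_sorted _ _ _ v).mp hv
          exact (PySem.Set.mem_ofList vals v).mp this
        have hpos : 0 < List.count v vals := List.count_pos_iff.mpr hvmem
        have hle : List.count v vals ≤ vals.length := List.count_le_length
        have hle2 : vals.length ≤ l.length := List.length_filter_le _ l
        rw [hcs, PySem.List.mem_pyRange_one]
        have hcl : List.count v vals ≤ l.length := le_trans hle hle2
        constructor
        · show (1 : Int) ≤ ((List.count v vals : Nat) : Int)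
          exact_mod_cast hpos
        · show ((List.count v vals : Nat) : Int) < (l.length : Int) + 1
          omega
    have h2 : runs.Perm ((PySem.Dict.counter vals).items) := by
      rw [hitems, hrunsC]
      exact List.Perm.map _ (PySem.List.sorted_perm _ _ _)
    exact h1.trans h2
  have hpw : (cs.flatMap (fun c => runs.filter (fun p => decide (p.2 = c)))).Pairwise rLex := by
    apply partition_pairwise
    · rw [hrunsC, List.pairwise_map]
      have := PySem.List.sorted_ofList_pairwise_lt vals
      exact this.imp (fun h => h)
    · rw [hcs]; exact PySem.List.pairwise_lt_pyRange_one 1 _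
  rw [sorted2_char ((PySem.Dict.counter vals).items) _ hperm hpw, List.flatMap_assoc]

theorem pyGetD_zero_headI (arr : List (List Int)) : PySem.List.pyGetD arr 0 [] = arr.headI := by
  cases arr
  · simp [PySem.List.pyGetD_zero]; rfl
  · simp [PySem.List.pyGetD_zero]

-- linecalc in row mode computes aCore of the truncated row
theorem linecalc_true (arr : List (List Int)) (k : Nat) (hk : k < arr.length)
    (hw : arr.headI.length ≤ arr[k].length) :
    linecalc (k : Int) arr true = aCore (arr[k].take arr.headI.length) := by
  unfold linecalc aCore
  simp only [pyGetD_zero_headI, if_true]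
  have hrow : PySem.List.pyGetD arr (k : Int) [] = arr[k] := by
    rw [PySem.List.pyGetD_eq_getElem arr [] (by positivity) (by exact_mod_cast hk)]
    simp
  rw [hrow]
  set w := arr.headI.length with hwdef
  have hlen : (arr[k].take w).length = w := by simp [List.length_take]; omega
  have hfold :
      (PySem.List.pyRange 0 (w : Int)).foldl
        (fun d i => if PySem.List.pyGetD arr[k] i 0 = 0 then d
          else (d.setdefault (PySem.List.pyGetD arr[k] i 0) 0).modify (PySem.List.pyGetD arr[k] i 0) 0 (· + 1))
        (PySem.Dict.empty : PySem.Dict Int Int)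
      = (arr[k].take w).foldl
          (fun d item => if item = 0 then d else (d.setdefault item 0).modify item 0 (· + 1))
          PySem.Dict.empty := by
    have hcong :
        (PySem.List.pyRange 0 (w : Int)).foldl
          (fun d i => if PySem.List.pyGetD arr[k] i 0 = 0 then d
            else (d.setdefault (PySem.List.pyGetD arr[k] i 0) 0).modify (PySem.List.pyGetD arr[k] i 0) 0 (· + 1))
          (PySem.Dict.empty : PySem.Dict Int Int)
        = (PySem.List.pyRange 0 (w : Int)).foldl
            (fun d i => if PySem.List.pyGetD (arr[k].take w) i 0 = 0 then d
              else (d.setdefault (PySem.List.pyGetD (arr[k].take w) i 0) 0).modify (PySem.List.pyGetD (arr[k].take w) i 0) 0 (· + 1))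
            (PySem.Dict.empty : PySem.Dict Int Int) := by
      apply PySem.List.foldl_congr_mem
      intro acc x hx
      rw [PySem.List.mem_pyRange_one] at hx
      have hx0 : 0 ≤ x := hx.1
      have hxw : x < (w : Int) := hx.2
      have : PySem.List.pyGetD (arr[k].take w) x 0 = PySem.List.pyGetD arr[k] x 0 := by
        rw [PySem.List.pyGetD_eq_getElem _ 0 hx0 (by rw [hlen]; exact_mod_cast hxw),
            PySem.List.pyGetD_eq_getElem _ 0 hx0 (by omega)]
        exact List.getElem_take
      rw [this]
    rw [hcong, show ((w : Int) = ((arr[k].take w).length : Int)) by rw [hlen]]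
    exact PySem.List.foldl_pyRange_zero_pyGetD' (arr[k].take w) 0
      (fun (d : PySem.Dict Int Int) (item : Int) => if item = 0 then d
        else (d.setdefault item 0).modify item 0 (· + 1)) PySem.Dict.empty
  rw [hfold]

-- linecalc in column mode computes aCore of the materialised column
theorem linecalc_false (arr : List (List Int)) (k : Nat) :
    linecalc (k : Int) arr false
      = aCore ((List.range arr.length).map (fun (i : Nat) =>
          PySem.List.pyGetD (PySem.List.pyGetD arr ((i : Nat) : Int) []) (k : Int) 0)) := by
  unfold linecalc aCore
  simp only [Bool.false_eq_true, if_false]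
  set col : List Int := (List.range arr.length).map (fun (i : Nat) =>
    PySem.List.pyGetD (PySem.List.pyGetD arr ((i : Nat) : Int) []) (k : Int) 0) with hcol
  have hfold :
      (PySem.List.pyRange 0 (arr.length : Int)).foldl
        (fun d i =>
          if PySem.List.pyGetD (PySem.List.pyGetD arr i []) (k : Int) 0 = 0 then d
          else ((d.setdefault (PySem.List.pyGetD (PySem.List.pyGetD arr i []) (k : Int) 0) 0).modify
            (PySem.List.pyGetD (PySem.List.pyGetD arr i []) (k : Int) 0) 0 (· + 1)))
        (PySem.Dict.empty : PySem.Dict Int Int)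
      = col.foldl (fun d item => if item = 0 then d
          else (d.setdefault item 0).modify item 0 (· + 1))
          (PySem.Dict.empty : PySem.Dict Int Int) := by
    rw [hcol, PySem.List.pyRange_one]
    simp only [Int.sub_zero, Int.toNat_natCast, List.foldl_map, Int.zero_add]
  rw [hfold]

-- A's break loop over indices is linesRec over the materialised lines
theorem loop_bridge (arr : List (List Int)) (isr : Bool) (rows : List (List Int)) :
    ∀ (m a : Nat), rows.length - a ≤ m →
    (∀ k : Nat, a ≤ k → k < rows.length → linecalc (k : Int) arr isr = flatOf (rows.getD k [])) →
    ∀ acc, arrcalcLoop arr isr (PySem.List.pyRange (a : Int) (rows.length : Int) 1) acc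
      = acc ++ linesRec (rows.drop a) := by
  intro m
  induction m with
  | zero =>
    intro a hm _ acc
    have ha : rows.length ≤ a := by omega
    rw [PySem.List.pyRange_one_eq_nil (by exact_mod_cast ha),
        List.drop_eq_nil_of_le ha]
    simp [arrcalcLoop, linesRec]
  | succ m ih =>
    intro a hm h acc
    by_cases ha : rows.length ≤ a
    · rw [PySem.List.pyRange_one_eq_nil (by exact_mod_cast ha),
          List.drop_eq_nil_of_le ha]
      simp [arrcalcLoop, linesRec]
    · have ha' : a < rows.length := by omega
      rw [PySem.List.pyRange_one_cons (by exact_mod_cast ha')]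
      rw [List.drop_eq_getElem_cons ha']
      have hget : rows.getD a [] = rows[a] := List.getD_eq_getElem rows [] ha'
      unfold arrcalcLoop linesRec
      rw [h a le_rfl ha', hget]
      by_cases hflat : flatOf rows[a] = []
      · simp [hflat]
      · simp only [hflat, if_false]
        rw [show ((a : Int) + 1 = ((a + 1 : Nat) : Int)) by push_cast; ring]
        rw [ih (a + 1) (by omega) (fun k hk1 hk2 => h k (by omega) hk2) (acc ++ [flatOf rows[a]])]
        simp

theorem maxFold_cast (ls : List (List Int)) :
    ∀ (a : Nat), ls.foldl (fun m l => max m (l.length : Int)) (a : Int)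
      = (((ls.map (fun l => l.length)).foldl max a : Nat) : Int) := by
  induction ls with
  | nil => intro a; simp
  | cons x xs ih =>
    intro a
    simp only [List.foldl_cons, List.map_cons]
    rw [show (max (a : Int) (x.length : Int) = ((max a x.length : Nat) : Int)) by rw [Nat.cast_max]]
    exact ih (max a x.length)

-- the inner fill loop only rewrites row i of the matrix
theorem inner_commute (i : Nat) :
    ∀ (l : List Int) (t : Int) (na : List (List Int)), i < na.length →
    (PySem.List.enumerate l t).foldl
        (fun na q => PySem.List.pySetD na (i : Int)
          (PySem.List.pySetD (PySem.List.pyGetD na (i : Int) []) q.1 q.2)) na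
      = na.set i ((PySem.List.enumerate l t).foldl
          (fun r q => PySem.List.pySetD r q.1 q.2) (na.getD i [])) := by
  intro l
  induction l with
  | nil =>
    intro t na hi
    simp only [PySem.List.enumerate]
    rw [List.getD_eq_getElem na [] hi]
    simp [List.set_getElem_self]
  | cons x xs ih =>
    intro t na hi
    rw [PySem.List.enumerate_cons]
    simp only [List.foldl_cons]
    have hgi : PySem.List.pyGetD na (i : Int) [] = na.getD i [] := by
      rw [PySem.List.pyGetD_eq_getElem na [] (by positivity) (by exact_mod_cast hi)]
      exact (List.getD_eq_getElem na [] hi).symm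
    rw [hgi, PySem.List.pySetD_natCast]
    rw [ih (t + 1) _ (by simpa using hi)]
    have hgi2 : (na.set i (PySem.List.pySetD (na.getD i []) t x)).getD i []
        = PySem.List.pySetD (na.getD i []) t x := by
      rw [List.getD_eq_getElem _ [] (by simpa using hi)]
      simp
    rw [hgi2, List.set_set]

-- filling a row left to right from position t
theorem rowfill :
    ∀ (l : List Int) (t : Nat) (row : List Int), t + l.length ≤ row.length →
    (PySem.List.enumerate l (t : Int)).foldl
        (fun r q => PySem.List.pySetD r q.1 q.2) row
      = row.take t ++ l ++ row.drop (t + l.length) := by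
  intro l
  induction l with
  | nil => intro t row _; simp [PySem.List.enumerate, List.take_append_drop]
  | cons x xs ih =>
    intro t row hlen
    rw [PySem.List.enumerate_cons]
    simp only [List.foldl_cons, List.length_cons] at *
    rw [PySem.List.pySetD_natCast,
        show ((t : Int) + 1) = ((t + 1 : Nat) : Int) by push_cast; ring,
        ih (t + 1) (row.set t x) (by simpa using by omega)]
    have ht : t < row.length := by omega
    rw [List.set_eq_take_cons_drop x ht]
    have hlt : (row.take t).length = t := by simp [List.length_take]; omega
    have h1 : ((row.take t ++ x :: row.drop (t + 1)).take (t + 1)) = row.take t ++ [x] := by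
      rw [List.take_append, hlt]
      rw [List.take_take, Nat.min_eq_right (by omega), show t + 1 - t = 1 by omega]
      simp
    have h2 : ((row.take t ++ x :: row.drop (t + 1)).drop (t + 1 + xs.length)) = row.drop (t + 1 + xs.length) := by
      rw [List.drop_append, hlt]
      rw [List.drop_eq_nil_of_le (by rw [hlt]; omega), show t + 1 + xs.length - t = xs.length + 1 by omega]
      simp only [List.nil_append, List.drop_succ_cons, List.drop_drop]
    rw [h1, h2, show t + (xs.length + 1) = t + 1 + xs.length by omega]
    simp [List.append_assoc]

theorem rowfill0 (l row : List Int) (h : l.length ≤ row.length) :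
    (PySem.List.enumerate l 0).foldl (fun r q => PySem.List.pySetD r q.1 q.2) row
      = l ++ row.drop l.length := by
  have := rowfill l 0 row (by omega)
  simpa using this

-- the full fill loop in row orientation produces the padded rows
theorem outerT (M : Nat) :
    ∀ (lists pre : List (List Int)), (∀ l ∈ lists, l.length ≤ M) →
    (PySem.List.enumerate lists (pre.length : Int)).foldl
        (fun na p => (PySem.List.enumerate p.2 0).foldl
          (fun na q => PySem.List.pySetD na p.1
            (PySem.List.pySetD (PySem.List.pyGetD na p.1 []) q.1 q.2)) na)
        (pre ++ List.replicate lists.length (List.replicate M 0))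
      = pre ++ lists.map (padTo M) := by
  intro lists
  induction lists with
  | nil => intro pre _; simp [PySem.List.enumerate]
  | cons l rest ih =>
    intro pre hle
    rw [PySem.List.enumerate_cons]
    simp only [List.foldl_cons, List.length_cons, List.replicate_succ]
    rw [inner_commute pre.length l 0 _ (by simp)]
    have hget : (pre ++ List.replicate M 0 :: List.replicate rest.length (List.replicate M 0)).getD pre.length []
        = List.replicate M 0 := by
      rw [List.getD_eq_getElem _ [] (by simp)]
      simp
    rw [hget, rowfill0 l (List.replicate M 0) (by simp [hle l (List.mem_cons_self ..)])]
    have hset : (pre ++ List.replicate M 0 :: List.replicate rest.length (List.replicate M 0)).set pre.length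
          (l ++ List.drop l.length (List.replicate M 0))
        = (pre ++ [padTo M l]) ++ List.replicate rest.length (List.replicate M 0) := by
      rw [List.set_append]
      simp [padTo, List.drop_replicate]
    rw [hset, show ((pre.length : Int) + 1) = (((pre ++ [padTo M l]).length : Nat) : Int) by simp,
        ih (pre ++ [padTo M l]) (fun x hx => hle x (List.mem_cons_of_mem _ hx))]
    simp

-- the column-orientation inner loop: effect on one cell
theorem innerF_cell (c0 L : Nat) (hc0 : c0 < L) :
    ∀ (l : List Int) (t : Nat) (na : List (List Int)) (r c : Nat),
    t + l.length ≤ na.length →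
    (∀ j : Nat, j < na.length → (na.getD j []).length = L) →
    r < na.length → c < L →
    ((((PySem.List.enumerate l (t : Int)).foldl
        (fun na q => PySem.List.pySetD na q.1
          (PySem.List.pySetD (PySem.List.pyGetD na q.1 []) (c0 : Int) q.2)) na).getD r []).getD c 0)
      = if c = c0 ∧ t ≤ r ∧ r - t < l.length then l.getD (r - t) 0
        else ((na.getD r []).getD c 0) := by
  intro l
  induction l with
  | nil =>
    intro t na r c _ _ _ _
    simp only [PySem.List.enumerate, List.foldl_nil, List.length_nil]
    rw [if_neg (by omega)]
  | cons x xs ih =>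
    intro t na r c hlen hrows hr hcL
    rw [PySem.List.enumerate_cons]
    simp only [List.foldl_cons, List.length_cons]
    have htlt : t < na.length := by simp at hlen; omega
    have hgt : PySem.List.pyGetD na (t : Int) [] = na.getD t [] := by
      rw [PySem.List.pyGetD_eq_getElem na [] (by positivity) (by exact_mod_cast htlt)]
      exact (List.getD_eq_getElem na [] htlt).symm
    rw [hgt, PySem.List.pySetD_natCast, PySem.List.pySetD_natCast]
    set na' := na.set t ((na.getD t []).set c0 x) with hna'
    have hlen' : na'.length = na.length := by simp [hna']
    have hrows' : ∀ j : Nat, j < na'.length → (na'.getD j []).length = L := by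
      intro j hj
      have hj' : j < na.length := by omega
      rw [List.getD_eq_getElem _ [] hj]
      simp only [hna', List.getElem_set]
      split_ifs with hjt
      · rw [List.length_set]
        exact hrows t htlt
      · rw [← List.getD_eq_getElem na [] hj']
        exact hrows j hj'
    have hna'r : na'.getD r [] = if t = r then (na.getD t []).set c0 x else na.getD r [] := by
      rw [List.getD_eq_getElem _ [] (by omega)]
      simp only [hna', List.getElem_set]
      split_ifs with h
      · rfl
      · exact (List.getD_eq_getElem na [] hr).symm
    rw [show ((t : Int) + 1) = ((t + 1 : Nat) : Int) by push_cast; ring]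
    rw [ih (t + 1) na' r c (by simp at hlen ⊢; omega) hrows' (by omega) hcL]
    by_cases hcc : c = c0
    · by_cases htr : t = r
      · rw [if_neg (by omega), if_pos ⟨hcc, by omega, by omega⟩, hna'r, if_pos htr,
            show r - t = 0 by omega]
        simp only [List.getD_cons_zero]
        rw [hcc, List.getD_eq_getElem _ 0 (by rw [List.length_set, hrows t htlt]; omega),
            List.getElem_set, if_pos rfl]
      · by_cases hrng : t ≤ r ∧ r - t < xs.length + 1
        · rw [if_pos ⟨hcc, by omega, by omega⟩, if_pos ⟨hcc, hrng.1, hrng.2⟩,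
              show r - t = (r - (t + 1)) + 1 by omega]
          simp
        · rw [if_neg (by rintro ⟨h1, h2, h3⟩; exact hrng ⟨by omega, by omega⟩),
              if_neg (by rintro ⟨h1, h2, h3⟩; exact hrng ⟨h2, h3⟩),
              hna'r, if_neg htr]
    · rw [if_neg (fun h => hcc h.1), if_neg (fun h => hcc h.1), hna'r]
      split_ifs with htr
      · rw [← htr,
            List.getD_eq_getElem _ 0 (by rw [List.length_set, hrows t htlt]; omega),
            List.getD_eq_getElem _ 0 (by rw [hrows t htlt]; omega),
            List.getElem_set, if_neg (fun h => hcc h.symm)]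
      · rfl

theorem innerF_cell0 (c0 L : Nat) (hc0 : c0 < L) (l : List Int) (na : List (List Int))
    (r c : Nat) (hlen : l.length ≤ na.length)
    (hrows : ∀ j : Nat, j < na.length → (na.getD j []).length = L)
    (hr : r < na.length) (hcL : c < L) :
    ((((PySem.List.enumerate l 0).foldl
        (fun na q => PySem.List.pySetD na q.1
          (PySem.List.pySetD (PySem.List.pyGetD na q.1 []) (c0 : Int) q.2)) na).getD r []).getD c 0)
      = if c = c0 ∧ r < l.length then l.getD r 0 else ((na.getD r []).getD c 0) := by
  have h := innerF_cell c0 L hc0 l 0 na r c (by omega) hrows hr hcL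
  simpa using h

theorem setfold_shape (c0 : Int) :
    ∀ (ps : List (Int × Int)) (na : List (List Int)), (∀ p ∈ ps, 0 ≤ p.1) →
    ((ps.foldl (fun na q => PySem.List.pySetD na q.1
        (PySem.List.pySetD (PySem.List.pyGetD na q.1 []) c0 q.2)) na).length = na.length)
    ∧ (∀ j : Nat, j < na.length →
        ((ps.foldl (fun na q => PySem.List.pySetD na q.1
          (PySem.List.pySetD (PySem.List.pyGetD na q.1 []) c0 q.2)) na).getD j []).length
        = (na.getD j []).length) := by
  intro ps
  induction ps with
  | nil => intro na _; simp
  | cons q qs ih =>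
    intro na hpos
    simp only [List.foldl_cons]
    set na' := PySem.List.pySetD na q.1
      (PySem.List.pySetD (PySem.List.pyGetD na q.1 []) c0 q.2) with hna'
    have hq : 0 ≤ q.1 := hpos q (List.mem_cons_self ..)
    have hlen' : na'.length = na.length := PySem.List.length_pySetD ..
    obtain ⟨h1, h2⟩ := ih na' (fun p hp => hpos p (List.mem_cons_of_mem _ hp))
    refine ⟨by rw [h1, hlen'], ?_⟩
    intro j hj
    rw [h2 j (by omega)]
    rw [hna', PySem.List.pySetD_of_nonneg na _ hq]
    by_cases hin : q.1.toNat < na.length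
    · rw [List.getD_eq_getElem _ [] (by simpa using hj), List.getElem_set]
      split_ifs with hjt
      · rw [PySem.List.length_pySetD, ← hjt,
            PySem.List.pyGetD_eq_getElem na [] hq (by omega),
            List.getD_eq_getElem na [] (by omega)]
      · rw [List.getD_eq_getElem na [] hj]
    · rw [List.set_eq_of_length_le (by omega)]

theorem outerF_cell (L : Nat) :
    ∀ (lists : List (List Int)) (s : Nat) (na : List (List Int)) (r c : Nat),
    s + lists.length ≤ L →
    (∀ j : Nat, j < na.length → (na.getD j []).length = L) →
    (∀ l ∈ lists, l.length ≤ na.length) →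
    r < na.length → c < L →
    ((((PySem.List.enumerate lists (s : Int)).foldl
        (fun na p => (PySem.List.enumerate p.2 0).foldl
          (fun na q => PySem.List.pySetD na q.1
            (PySem.List.pySetD (PySem.List.pyGetD na q.1 []) p.1 q.2)) na) na).getD r []).getD c 0)
      = if s ≤ c ∧ c - s < lists.length ∧ r < (lists.getD (c - s) []).length
          then (lists.getD (c - s) []).getD r 0
          else ((na.getD r []).getD c 0) := by
  intro lists
  induction lists with
  | nil =>
    intro s na r c _ _ _ _ _
    simp only [PySem.List.enumerate, List.foldl_nil, List.length_nil]
    rw [if_neg (by omega)]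
  | cons l rest ih =>
    intro s na r c hsL hrows hll hr hcL
    rw [PySem.List.enumerate_cons]
    simp only [List.length_cons] at hsL
    simp only [List.foldl_cons, List.length_cons]
    set na' := (PySem.List.enumerate l 0).foldl
      (fun na q => PySem.List.pySetD na q.1
        (PySem.List.pySetD (PySem.List.pyGetD na q.1 []) (s : Int) q.2)) na with hna'
    have hposl : ∀ p ∈ PySem.List.enumerate l 0, 0 ≤ p.1 := by
      intro p hp
      rw [PySem.List.mem_enumerate_iff] at hp
      obtain ⟨k, hk, rfl⟩ := hp
      positivity
    have hshape := setfold_shape (s : Int) (PySem.List.enumerate l 0) na hposl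
    have hlen' : na'.length = na.length := by rw [hna']; exact hshape.1
    have hrows' : ∀ j : Nat, j < na'.length → (na'.getD j []).length = L := by
      intro j hj
      rw [hna', hshape.2 j (by omega)]
      exact hrows j (by omega)
    rw [show ((s : Int) + 1) = ((s + 1 : Nat) : Int) by push_cast; ring]
    rw [ih (s + 1) na' r c (by omega) hrows'
        (fun x hx => by rw [hlen']; exact hll x (List.mem_cons_of_mem _ hx))
        (by omega) hcL]
    have hcell' : (na'.getD r []).getD c 0
        = if c = s ∧ r < l.length then l.getD r 0 else ((na.getD r []).getD c 0) := by
      rw [hna']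
      exact innerF_cell0 s L (by omega) l na r c
        (hll l (List.mem_cons_self ..)) hrows hr hcL
    by_cases hcs : c = s
    · have h0 : (l :: rest).getD (c - s) [] = l := by
        rw [show c - s = 0 by omega]; rfl
      rw [if_neg (by omega), hcell']
      by_cases hrl : r < l.length
      · rw [if_pos ⟨hcs, hrl⟩, if_pos ⟨by omega, by omega, by rw [h0]; exact hrl⟩, h0]
      · rw [if_neg (fun h => hrl h.2), if_neg (fun h => hrl (h0 ▸ h.2.2))]
    · by_cases hgt : s + 1 ≤ c
      · have h0 : (l :: rest).getD (c - s) [] = rest.getD (c - (s + 1)) [] := by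
          rw [show c - s = (c - (s + 1)) + 1 by omega, List.getD_cons_succ]
        rw [h0]
        by_cases hcond : s + 1 ≤ c ∧ c - (s + 1) < rest.length ∧ r < (rest.getD (c - (s + 1)) []).length
        · rw [if_pos hcond, if_pos ⟨by omega, by omega, hcond.2.2⟩]
        · rw [if_neg hcond, hcell', if_neg (fun h => hcs h.1),
              if_neg (fun h => hcond ⟨by omega, by omega, h.2.2⟩)]
      · rw [if_neg (by omega), hcell', if_neg (fun h => hcs h.1), if_neg (by omega)]

theorem outerF_shape :
    ∀ (lists : List (List Int)) (s : Int) (na : List (List Int)),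
    (((PySem.List.enumerate lists s).foldl
        (fun na p => (PySem.List.enumerate p.2 0).foldl
          (fun na q => PySem.List.pySetD na q.1
            (PySem.List.pySetD (PySem.List.pyGetD na q.1 []) p.1 q.2)) na) na).length = na.length)
    ∧ (∀ j : Nat, j < na.length →
        (((PySem.List.enumerate lists s).foldl
          (fun na p => (PySem.List.enumerate p.2 0).foldl
            (fun na q => PySem.List.pySetD na q.1
              (PySem.List.pySetD (PySem.List.pyGetD na q.1 []) p.1 q.2)) na) na).getD j []).length
        = (na.getD j []).length) := by
  intro lists
  induction lists with
  | nil => intro s na; simp [PySem.List.enumerate]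
  | cons l rest ih =>
    intro s na
    rw [PySem.List.enumerate_cons]
    simp only [List.foldl_cons]
    have hpos : ∀ p ∈ PySem.List.enumerate l 0, 0 ≤ p.1 := by
      intro p hp
      rw [PySem.List.mem_enumerate_iff] at hp
      obtain ⟨k, hk, rfl⟩ := hp
      positivity
    have hstep := setfold_shape s (PySem.List.enumerate l 0) na hpos
    obtain ⟨h1, h2⟩ := ih (s + 1) ((PySem.List.enumerate l 0).foldl
      (fun na q => PySem.List.pySetD na q.1
        (PySem.List.pySetD (PySem.List.pyGetD na q.1 []) s q.2)) na)
    refine ⟨by rw [h1, hstep.1], ?_⟩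
    intro j hj
    rw [h2 j (by rw [hstep.1]; omega), hstep.2 j hj]

theorem padTo_getD (M : Nat) (l : List Int) (r : Nat) (h : l.length ≤ M) (hr : r < M) :
    (padTo M l).getD r 0 = if r < l.length then l.getD r 0 else 0 := by
  unfold padTo
  by_cases hrl : r < l.length
  · rw [if_pos hrl, List.getD_eq_getElem _ 0 (by simp; omega),
        List.getElem_append_left hrl, List.getD_eq_getElem _ 0 hrl]
  · rw [if_neg hrl, List.getD_eq_getElem _ 0 (by simp; omega),
        List.getElem_append_right (by omega)]
    simp

theorem matrix_ext (A B : List (List Int)) (h1 : A.length = B.length)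
    (h2 : ∀ r : Nat, r < A.length → (A.getD r []).length = (B.getD r []).length)
    (h3 : ∀ r c : Nat, r < A.length → c < (A.getD r []).length →
      (A.getD r []).getD c 0 = (B.getD r []).getD c 0) : A = B := by
  apply List.ext_getElem h1
  intro i hi1 hi2
  have hrow := h2 i hi1
  rw [List.getD_eq_getElem A [] hi1, List.getD_eq_getElem B [] hi2] at hrow
  apply List.ext_getElem hrow
  intro j hj1 hj2
  have hcell := h3 i j hi1 (by rw [List.getD_eq_getElem A [] hi1]; exact hj1)
  rw [List.getD_eq_getElem A [] hi1, List.getD_eq_getElem B [] hi2,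
      List.getD_eq_getElem _ 0 hj1, List.getD_eq_getElem _ 0 hj2] at hcell
  exact hcell

theorem main_eq (arr : List (List Int)) (_hne : arr ≠ [])
    (hrows : ∀ row ∈ arr, arr.headI.length ≤ row.length) :
    arrcalc arr = arrcalc_alt arr := by
  unfold arrcalc arrcalc_alt
  simp only [pyGetD_zero_headI]
  set w := arr.headI.length with hw
  set n := arr.length with hn
  by_cases hcase : (w : Int) ≤ (n : Int)
  · -- row mode
    rw [show (decide ((n : Int) ≥ (w : Int)) = true) by simpa using hcase]
    simp only [if_true]
    simp only [PySem.List.slice_to_natCast]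
    set rows := arr.map (fun row => row.take w) with hrowsdef
    have hyp : ∀ k : Nat, 0 ≤ k → k < rows.length →
        linecalc (k : Int) arr true = flatOf (rows.getD k []) := by
      intro k _ hk
      have hk' : k < arr.length := by simpa [hrowsdef] using hk
      have hget : rows.getD k [] = arr[k].take w := by
        rw [List.getD_eq_getElem _ [] hk]
        simp [hrowsdef]
      rw [hget]
      exact (linecalc_true arr k hk' (hrows arr[k] (List.getElem_mem hk'))).trans
        (aCore_flatOf _)
    have hb := loop_bridge arr true rows rows.length 0 (by omega) hyp []
    simp only [Nat.cast_zero, List.drop_zero, List.nil_append, List.length_map,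
      hrowsdef] at hb
    rw [← hn] at hb
    rw [hb]
    set lines := linesRec (arr.map (fun row => row.take w)) with hlinesdef
    set width := (lines.map (fun l => l.length)).foldl max 0 with hwidthdef
    have hmax := maxFold_cast lines 0
    simp only [Nat.cast_zero] at hmax
    rw [hmax, ← hwidthdef, Int.toNat_natCast, Int.toNat_natCast]
    have hbound : ∀ l ∈ lines, l.length ≤ width := by
      intro l hl
      exact (PySem.List.le_foldl_max_nat (lines.map (fun l => l.length)) (fun x => x) 0).2
        l.length (List.mem_map_of_mem hl)
    have ho := outerT width lines [] hbound
    simp only [List.length_nil, Nat.cast_zero, List.nil_append] at ho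
    rw [ho]
    rfl
  · rw [show (decide ((n : Int) ≥ (w : Int)) = false) by simpa using hcase]
    simp only [Bool.false_eq_true, if_false]
    set cols := (List.range w).map (fun (j : Nat) => (List.range n).map (fun (i : Nat) =>
      PySem.List.pyGetD (PySem.List.pyGetD arr ((i : Nat) : Int) []) ((j : Nat) : Int) 0)) with hcolsdef
    have hyp : ∀ k : Nat, 0 ≤ k → k < cols.length →
        linecalc (k : Int) arr false = flatOf (cols.getD k []) := by
      intro k _ hk
      have hkw : k < w := by simpa [hcolsdef] using hk
      have hget : cols.getD k [] = (List.range n).map (fun (i : Nat) =>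
          PySem.List.pyGetD (PySem.List.pyGetD arr ((i : Nat) : Int) []) ((k : Nat) : Int) 0) := by
        rw [List.getD_eq_getElem _ [] hk]
        simp [hcolsdef]
      rw [hget, hn]
      exact (linecalc_false arr k).trans (aCore_flatOf _)
    have hb := loop_bridge arr false cols cols.length 0 (by omega) hyp []
    have hclen : cols.length = w := by simp [hcolsdef]
    rw [hclen] at hb
    simp only [Nat.cast_zero, List.drop_zero, List.nil_append] at hb
    rw [hb]
    set lines := linesRec cols with hlinesdef
    set width := (lines.map (fun l => l.length)).foldl max 0 with hwidthdef
    have hmax := maxFold_cast lines 0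
    simp only [Nat.cast_zero] at hmax
    rw [hmax, ← hwidthdef, Int.toNat_natCast, Int.toNat_natCast]
    set L := lines.length with hLdef
    set na0 := List.replicate width (List.replicate L (0 : Int)) with hna0def
    have hbound : ∀ l ∈ lines, l.length ≤ width := by
      intro l hl
      exact (PySem.List.le_foldl_max_nat (lines.map (fun l => l.length)) (fun x => x) 0).2
        l.length (List.mem_map_of_mem hl)
    have hshape := outerF_shape lines 0 na0
    have hrows0 : ∀ j : Nat, j < na0.length → (na0.getD j []).length = L := by
      intro j hj
      rw [List.getD_eq_getElem _ [] hj]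
      simp [hna0def]
    have hlhslen : ((PySem.List.enumerate lines 0).foldl
        (fun na p => (PySem.List.enumerate p.2 0).foldl
          (fun na q => PySem.List.pySetD na q.1
            (PySem.List.pySetD (PySem.List.pyGetD na q.1 []) p.1 q.2)) na) na0).length = width := by
      rw [hshape.1]
      simp [hna0def]
    apply matrix_ext
    · rw [hlhslen]
      simp
    · intro r hrlen
      have hrw : r < width := by rw [hlhslen] at hrlen; exact hrlen
      rw [hshape.2 r (by simp [hna0def]; exact hrw)]
      rw [List.getD_eq_getElem na0 [] (by simp [hna0def]; exact hrw),
          List.getD_eq_getElem _ [] (by simp; exact hrw)]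
      simp [hna0def]
    · intro r c hrlen hclen
      have hrw : r < width := by rw [hlhslen] at hrlen; exact hrlen
      have hcL : c < L := by
        rw [hshape.2 r (by simp [hna0def]; exact hrw),
            List.getD_eq_getElem na0 [] (by simp [hna0def]; exact hrw)] at hclen
        simpa [hna0def] using hclen
      have hcell := outerF_cell L lines 0 na0 r c (by omega) hrows0
        (fun l hl => by rw [show na0.length = width by simp [hna0def]]; exact hbound l hl)
        (by simp [hna0def]; exact hrw) hcL
      simp only [Nat.cast_zero, Nat.sub_zero] at hcell
      rw [hcell]
      have hmem : lines.getD c [] ∈ lines := by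
        rw [List.getD_eq_getElem _ [] hcL]
        exact List.getElem_mem hcL
      have hpad : (List.map (fun l => l ++ List.replicate (width - l.length) (0 : Int)) lines).getD c []
          = padTo width (lines.getD c []) := by
        rw [List.getD_eq_getElem _ [] (by simpa using hcL), List.getElem_map,
            List.getD_eq_getElem _ [] hcL]
        rfl
      have hR : ((List.map (fun (j : Nat) => List.map (fun (i : Nat) =>
            PySem.List.pyGetD (PySem.List.pyGetD
              (List.map (fun l => l ++ List.replicate (width - l.length) (0 : Int)) lines)
              ((i : Nat) : Int) []) ((j : Nat) : Int) 0) (List.range L))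
            (List.range width)).getD r []).getD c 0
          = (padTo width (lines.getD c [])).getD r 0 := by
        rw [List.getD_eq_getElem _ [] (by simpa using hrw)]
        simp only [List.getElem_map, List.getElem_range]
        rw [List.getD_eq_getElem _ 0 (by simpa using hcL)]
        simp only [List.getElem_map, List.getElem_range]
        rw [PySem.List.pyGetD_natCast, PySem.List.pyGetD_natCast, hpad]
      rw [hR, padTo_getD width _ r (hbound _ hmem) hrw]
      have hz : (na0.getD r []).getD c 0 = 0 := by
        rw [List.getD_eq_getElem na0 [] (by simp [hna0def]; exact hrw)]
        simp [hna0def]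
      by_cases hrl : r < (lines.getD c []).length
      · rw [if_pos ⟨Nat.zero_le _, hcL, hrl⟩, if_pos hrl]
      · rw [if_neg (fun h => hrl h.2.2), if_neg hrl, hz]

-- ===== VERDICT (by name: the statement is the Claim_ definition above) =====
theorem arrcalc_spec : Claim_equal_arrcalc := by
  intro arr _ hpre
  unfold Spec_arrcalc
  exact main_eq arr hpre.1 hpre.2
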